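-- pv_equiv track=rewrite | github.com/jpegleg/paludification_toad | ansible/files/limits.py | split_login_conf_stanzas
-- ===== SOURCE A (Python) =====
-- def split_login_conf_stanzas(text: str) -> list[list[str]]:
--     lines = text.splitlines()
--     if not lines:
--         return []
--
--     stanzas = []
--     current = []
--
--     for line in lines:
--         if not current:
--             current = [line]
--             continue
--
--         previous = current[-1].rstrip()
--         starts_new = line and not line[0].isspace() and not previous.endswith("\\")
--         if starts_new:
--             stanzas.append(current)
--             current = [line]
--         else:
--             current.append(line)
--
--     if current:
--         stanzas.append(current)
--
--     return stanzas
-- ===== SOURCE B (Python) =====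
-- def split_login_conf_stanzas(text: str) -> list[list[str]]:
--     lines = text.splitlines()
--     stanzas = []
--     while lines:
--         prev = lines[0]
--         group = [prev]
--         rest = lines[1:]
--         while rest:
--             line = rest[0]
--             if line and not line[0].isspace() and not prev.rstrip().endswith("\\"):
--                 break
--             group.append(line)
--             prev = line
--             rest = rest[1:]
--         stanzas.append(group)
--         lines = rest
--     return stanzas
-- ===== Notes on version B (the rewrite author's own statement) =====
-- stated objective: alternative
-- what changed: B delimits each stanza with an inner scan that consumes continuation lines and emits the stanza immediately, instead of A's single accumulate-into-current loop with a final flush.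
import Mathlib
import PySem

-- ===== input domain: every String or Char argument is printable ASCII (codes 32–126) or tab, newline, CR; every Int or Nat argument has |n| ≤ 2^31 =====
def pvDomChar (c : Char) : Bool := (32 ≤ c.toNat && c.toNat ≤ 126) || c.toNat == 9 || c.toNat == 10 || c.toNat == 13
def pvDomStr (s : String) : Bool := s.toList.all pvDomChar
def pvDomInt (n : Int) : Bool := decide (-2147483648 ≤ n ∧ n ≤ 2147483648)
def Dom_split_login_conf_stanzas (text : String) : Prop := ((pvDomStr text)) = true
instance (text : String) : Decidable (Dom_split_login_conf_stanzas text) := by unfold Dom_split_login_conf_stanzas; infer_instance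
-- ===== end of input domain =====

-- B delimits each stanza with an inner scan over the remaining lines and emits it immediately,
-- instead of A's single accumulate-into-current loop with a final flush (objective: alternative).

-- ===== PORT A =====
-- `line and not line[0].isspace() and not previous.endswith("\\")` (previous already rstripped)
def pvStartsNewA (previous line : String) : Bool :=
  match PySem.Str.pyGet? line 0 with
  | none => false            -- `line` is falsy (empty): short-circuit, no IndexError
  | some c => !PySem.Chars.isspace c && !PySem.Str.endswith previous "\\"

-- the loop body of A's for-loop, as a named fold step (literal transliteration of the body)
def pvAStep (st : List (List String) × List String) (line : String) :
    List (List String) × List String :=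
  let stanzas := st.1
  let current := st.2
  if current.isEmpty then (stanzas, [line])
  else
    -- current[-1] is total here because this branch has current nonempty
    let previous := PySem.Str.rstrip (PySem.List.pyGetD current (-1) "")
    if pvStartsNewA previous line then (stanzas ++ [current], [line])
    else (stanzas, current ++ [line])

def split_login_conf_stanzas (text : String) : List (List String) :=
  let lines := PySem.Str.splitlines text
  if lines.isEmpty then []
  else
    let st := lines.foldl pvAStep ([], [])
    if st.2.isEmpty then st.1 else st.1 ++ [st.2]

-- ===== PORT B =====
-- the inner while-loop: consumes continuation lines after `prev`, returns (group tail, rest)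
-- B's break test: `line and not line[0].isspace() and not prev.rstrip().endswith("\\")`
def pvStartsNewB (prev line : String) : Bool :=
  match PySem.Str.pyGet? line 0 with
  | none => false
  | some c => !PySem.Chars.isspace c && !PySem.Str.endswith (PySem.Str.rstrip prev) "\\"

def pvAltTake (prev : String) : List String → List String × List String
  | [] => ([], [])
  | line :: rest =>
    if pvStartsNewB prev line then ([], line :: rest)
    else
      let gr := pvAltTake line rest
      (line :: gr.1, gr.2)

-- (termination lemma for the outer loop; cited by pvAltChunks' decreasing_by)
theorem pvAltTake_snd_length_le (prev : String) (ls : List String) :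
    (pvAltTake prev ls).2.length ≤ ls.length := by
  induction ls generalizing prev with
  | nil => simp [pvAltTake]
  | cons line rest ih =>
    simp only [pvAltTake]
    split
    · simp
    · exact Nat.le_succ_of_le (ih line)

-- the outer while-loop over the remaining lines
def pvAltChunks : List String → List (List String)
  | [] => []
  | prev :: rest =>
    let gr := pvAltTake prev rest
    (prev :: gr.1) :: pvAltChunks gr.2
termination_by ls => ls.length
decreasing_by
  exact Nat.lt_succ_of_le (pvAltTake_snd_length_le prev rest)

def split_login_conf_stanzas_alt (text : String) : List (List String) :=
  pvAltChunks (PySem.Str.splitlines text)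

-- ===== PRECONDITION & SPEC =====
def Spec_split_login_conf_stanzas (text : String) (out : List (List String)) : Prop := out = split_login_conf_stanzas_alt text
instance (text : String) (out : List (List String)) : Decidable (Spec_split_login_conf_stanzas text out) := by unfold Spec_split_login_conf_stanzas; infer_instance

-- ===== CLAIM (what is proved, stated in full; the proofs are below) =====
def Claim_equal_split_login_conf_stanzas : Prop := ∀ (text : String), Dom_split_login_conf_stanzas text → Spec_split_login_conf_stanzas text (split_login_conf_stanzas text)

-- ===== LEMMAS AND PROOFS =====

-- the two ports' break tests agree once A has fetched the previous line
theorem pvStartsNew_eq (p line : String) :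
    pvStartsNewA (PySem.Str.rstrip p) line = pvStartsNewB p line := rfl

-- A's fold, started from a nonempty current stanza whose last line is p, finishes into:
-- the stanzas so far, then current extended by the continuation lines, then B's chunks of the rest.
theorem pvFoldA (rest : List String) :
    ∀ (s : List (List String)) (c : List String) (p : String), c ≠ [] →
      PySem.List.pyGetD c (-1) "" = p →
      (let st := rest.foldl pvAStep (s, c);
        if st.2.isEmpty then st.1 else st.1 ++ [st.2])
      = s ++ ((c ++ (pvAltTake p rest).1) :: pvAltChunks (pvAltTake p rest).2) := by
  induction rest with
  | nil =>
    intro s c p hc _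
    simp [pvAltTake, pvAltChunks, hc]
  | cons line rest' ih =>
    intro s c p hc hp
    have hce : c.isEmpty = false := by simp [hc]
    simp only [List.foldl_cons]
    have hstep : pvAStep (s, c) line =
        if pvStartsNewB p line then (s ++ [c], [line]) else (s, c ++ [line]) := by
      simp [pvAStep, hce, hp, pvStartsNew_eq]
    rw [hstep]
    cases hsn : pvStartsNewB p line with
    | true =>
      simp only [if_true]
      rw [ih (s ++ [c]) [line] line (by simp) (by simpa using PySem.List.pyGetD_neg_one_append_singleton [] line "")]
      simp only [pvAltTake, hsn, if_true]
      rw [pvAltChunks]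
      simp
    | false =>
      simp only [Bool.false_eq_true, if_false]
      rw [ih s (c ++ [line]) line (by simp) (PySem.List.pyGetD_neg_one_append_singleton c line "")]
      simp only [pvAltTake, hsn, Bool.false_eq_true, if_false]
      simp

-- ===== VERDICT (by name: the statement is the Claim_ definition above) =====
theorem split_login_conf_stanzas_spec : Claim_equal_split_login_conf_stanzas := by
  intro text _
  show split_login_conf_stanzas text = split_login_conf_stanzas_alt text
  unfold split_login_conf_stanzas split_login_conf_stanzas_alt
  cases h : PySem.Str.splitlines text with
  | nil => rw [pvAltChunks]; rfl
  | cons l ls =>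
    simp only [List.isEmpty_cons, Bool.false_eq_true, if_false, List.foldl_cons]
    have h0 : pvAStep ([], []) l = ([], [l]) := rfl
    rw [h0, pvFoldA ls [] [l] l (by simp)
      (by simpa using PySem.List.pyGetD_neg_one_append_singleton [] l "")]
    rw [pvAltChunks]
    simp
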